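-- pv_equiv track=rewrite | github.com/ansunsujoe/ai-programs | patternProject/symbols.py | parseSymbolArray
-- ===== SOURCE A (Python) =====
-- def parseSymbolArray(array):
--     # Initialize variables
--     uniqueValues = list(sorted(set(array)))
--     dictionary = {}
--
--     # Create the dictionary
--     for i in range(len(uniqueValues)):
--         dictionary[uniqueValues[i]] = i + 1
--
--     # Find the new array based on this dictionary
--     numericalArray = []
--     for x in array:
--         numericalArray.append(dictionary[x])
--
--     # Return the dictionary
--     return dictionary, numericalArray
-- ===== SOURCE B (Python) =====
-- def parseSymbolArray(array):
--     # One ordered sweep over index-tagged sorted pairs with change detection,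
--     # scattering ranks back to original positions (no dict lookups).
--     pairs = sorted((v, i) for i, v in enumerate(array))
--     dictionary = {}
--     numericalArray = [0] * len(array)
--     rank = 0
--     prev = None
--     for v, i in pairs:
--         if prev is None or v != prev:
--             rank += 1
--             prev = v
--             dictionary[v] = rank
--         numericalArray[i] = rank
--     return dictionary, numericalArray
-- ===== Notes on version B (the rewrite author's own statement) =====
-- stated objective: alternative
-- what changed: Instead of building a rank dictionary from sorted(set(array)) and then re-scanning the input with dict lookups, B sorts (value, index) pairs once and does a single change-detecting sweep that assigns ranks and scatters them back to the original positions, with no dict lookups at all.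
import Mathlib
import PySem

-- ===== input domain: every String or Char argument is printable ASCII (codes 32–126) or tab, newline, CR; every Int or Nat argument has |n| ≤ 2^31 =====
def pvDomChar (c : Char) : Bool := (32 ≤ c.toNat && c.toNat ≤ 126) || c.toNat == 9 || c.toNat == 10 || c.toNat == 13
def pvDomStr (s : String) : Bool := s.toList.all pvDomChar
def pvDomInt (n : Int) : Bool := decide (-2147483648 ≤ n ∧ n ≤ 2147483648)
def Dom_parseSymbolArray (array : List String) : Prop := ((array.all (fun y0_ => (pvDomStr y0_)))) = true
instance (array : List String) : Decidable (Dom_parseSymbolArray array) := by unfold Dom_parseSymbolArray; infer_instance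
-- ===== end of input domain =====

-- B replaces A's dict-build-then-relookup scheme by one change-detecting sweep over
-- index-tagged sorted pairs that scatters ranks back to original positions.

-- ===== PORT A =====
-- dictionary[x] never raises here (every x of array is a key), so the lookup is ported as getD.
def parseSymbolArray (array : List String) : (List (String × Int)) × List Int :=
  let uniqueValues := PySem.List.sorted (PySem.Set.ofList array) (fun x => x)
  let dictionary := (PySem.List.pyRange 0 (PySem.List.len uniqueValues)).foldl
      (fun d i => d.insert (PySem.List.pyGetD uniqueValues i "") (i + 1)) PySem.Dict.empty
  let numericalArray := array.foldl (fun acc x => acc ++ [dictionary.getD x 0]) []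
  (dictionary.items, numericalArray)

-- ===== PORT B =====
-- numericalArray[i] = rank: i comes from enumerate, so 0 ≤ i < len(array) and .toNat is exact.
def parseSymbolArray_alt (array : List String) : (List (String × Int)) × List Int :=
  let pairs := PySem.List.sorted2 ((PySem.List.enumerate array 0).map (fun p => (p.2, p.1)))
      (fun q => q.1) (fun q => q.2)
  let res := pairs.foldl (fun s q =>
      match s with
      | (d, a, r, prev) =>
        if prev = none ∨ ¬ prev = some q.1 then
          (d.insert q.1 (r + 1), (a.set q.2.toNat (r + 1), (r + 1, some q.1)))
        else
          (d, (a.set q.2.toNat r, (r, prev))))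
    (PySem.Dict.empty, (List.replicate array.length 0, ((0 : Int), (none : Option String))))
  (res.1.items, res.2.1)

-- ===== PRECONDITION & SPEC =====
def Spec_parseSymbolArray (array : List String) (out : (List (String × Int)) × List Int) : Prop := out = parseSymbolArray_alt array
instance (array : List String) (out : (List (String × Int)) × List Int) : Decidable (Spec_parseSymbolArray array out) := by unfold Spec_parseSymbolArray; infer_instance

-- ===== CLAIM (what is proved, stated in full; the proofs are below) =====
def Claim_equal_parseSymbolArray : Prop := ∀ (array : List String), Dom_parseSymbolArray array → Spec_parseSymbolArray array (parseSymbolArray array)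

-- ===== LEMMAS AND PROOFS =====

-- the sorted distinct values of the input, and the 1-based rank of a value among them
def uniqL (array : List String) : List String :=
  PySem.List.sorted (PySem.Set.ofList array) (fun x => x)

def rnk (array : List String) (x : String) : Int := ((uniqL array).idxOf x : Int) + 1

-- the (ascending) positions at which value v occurs in array
def occL (array : List String) (v : String) : List Int :=
  ((PySem.List.enumerate array 0).filter (fun p => p.2 == v)).map (fun p => p.1)

-- the sorted (value, index) pairs, grouped by value
def grpL (array : List String) : List (String × Int) :=
  (uniqL array).flatMap (fun v => (occL array v).map (fun i => (v, i)))

lemma uniq_nodup (array : List String) : (uniqL array).Nodup :=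
  ((PySem.List.sorted_perm (PySem.Set.ofList array) (fun x => x) false).nodup_iff).mpr
    (PySem.Set.nodup_ofList array)

lemma uniq_pairwise (array : List String) : (uniqL array).Pairwise (· < ·) :=
  PySem.List.sorted_ofList_pairwise_lt array

lemma mem_uniq_iff (array : List String) (x : String) : x ∈ uniqL array ↔ x ∈ array := by
  rw [uniqL, PySem.List.mem_sorted, PySem.Set.mem_ofList]

lemma enumerate_shift (xs : List String) (s : Int) :
    PySem.List.enumerate xs (s + 1) = (PySem.List.enumerate xs s).map (fun p => (p.1 + 1, p.2)) := by
  induction xs generalizing s with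
  | nil => simp [PySem.List.enumerate]
  | cons x xs ih => simp [PySem.List.enumerate_cons, ih]

-- ---- A's side ----

lemma A_dict_items (array : List String) :
    ((PySem.List.pyRange 0 (PySem.List.len (uniqL array))).foldl
      (fun d i => d.insert (PySem.List.pyGetD (uniqL array) i "") (i + 1)) PySem.Dict.empty).items
    = (PySem.List.enumerate (uniqL array) 0).map (fun p => (p.2, p.1 + 1)) := by
  have h1 : (PySem.List.pyRange 0 (PySem.List.len (uniqL array))).foldl
      (fun d i => d.insert (PySem.List.pyGetD (uniqL array) i "") (i + 1)) PySem.Dict.empty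
      = (PySem.List.enumerate (uniqL array) 0).foldl
      (fun d p => d.insert p.2 (p.1 + 1)) PySem.Dict.empty := by
    rw [PySem.List.enumerate_eq_map_pyRange (uniqL array) "", List.foldl_map]
  have h2 := PySem.Dict.items_foldl_insert_fresh (PySem.List.enumerate (uniqL array) 0)
    (fun p => p.2) (fun p => p.1 + 1) PySem.Dict.empty
    (fun a _ => PySem.Dict.contains_empty _)
    (by rw [PySem.List.map_snd_enumerate]; exact uniq_nodup array)
  rw [h1, h2]
  simp [PySem.Dict.empty]

lemma A_getD (array : List String) (x : String) (hx : x ∈ array) :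
    ((PySem.List.pyRange 0 (PySem.List.len (uniqL array))).foldl
      (fun d i => d.insert (PySem.List.pyGetD (uniqL array) i "") (i + 1)) PySem.Dict.empty).getD x 0
    = rnk array x := by
  set d := (PySem.List.pyRange 0 (PySem.List.len (uniqL array))).foldl
      (fun d i => d.insert (PySem.List.pyGetD (uniqL array) i "") (i + 1)) PySem.Dict.empty with hd
  have hxu : x ∈ uniqL array := (mem_uniq_iff array x).2 hx
  have hik := List.idxOf_lt_length_of_mem hxu
  have hmem : (x, rnk array x) ∈ d.items := by
    rw [hd, A_dict_items]
    refine List.mem_map.2 ⟨((0 : Int) + ((uniqL array).idxOf x : Int), (uniqL array)[(uniqL array).idxOf x]), ?_, ?_⟩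
    · exact (PySem.List.mem_enumerate_iff _ _ _).2 ⟨_, hik, rfl⟩
    · simp [rnk, List.getElem_idxOf]
  have hnd : d.keys.Nodup := by
    rw [hd]
    exact PySem.Dict.nodup_keys_foldl_insert_key _ _ _ _ (by simp [PySem.Dict.empty, PySem.Dict.keys])
  exact PySem.Dict.getD_of_mem_items d hmem hnd 0

lemma A_eval (array : List String) :
    parseSymbolArray array
    = ((PySem.List.enumerate (uniqL array) 0).map (fun p => (p.2, p.1 + 1)),
        array.map (rnk array)) := by
  show ((_ : PySem.Dict String Int).items, _) = _
  rw [PySem.List.foldl_append_singleton_eq_map]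
  refine Prod.ext ?_ ?_
  · exact A_dict_items array
  · show [] ++ array.map _ = array.map _
    rw [List.nil_append]
    exact List.map_congr_left (fun x hx => A_getD array x hx)

-- ---- B's side: the sorted pairs are the grouped pairs ----

lemma lex_right (v : String) {i j : Int} (h : i < j) :
    (toLex (v, i) : Lex (String × Int)) < toLex (v, j) := by
  simp [Prod.Lex.lt_iff, h]

lemma lex_left {v w : String} (i j : Int) (h : v < w) :
    (toLex (v, i) : Lex (String × Int)) < toLex (w, j) := by
  simp [Prod.Lex.lt_iff, h]

lemma flatMap_filter_perm : ∀ (vs : List String) (E : List (Int × String)), vs.Nodup →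
    (∀ p ∈ E, p.2 ∈ vs) →
    (vs.flatMap (fun v => E.filter (fun p => p.2 == v))).Perm E := by
  intro vs
  induction vs with
  | nil =>
    intro E _ hcov
    have hE : E = [] := List.eq_nil_iff_forall_not_mem.2 (fun p hp => by simpa using hcov p hp)
    simp [hE]
  | cons v vs ih =>
    intro E hnd hcov
    rcases List.nodup_cons.1 hnd with ⟨hvn, hnd'⟩
    rw [List.flatMap_cons]
    have hrest : vs.flatMap (fun w => E.filter (fun p => p.2 == w))
        = vs.flatMap (fun w => (E.filter (fun p => !(p.2 == v))).filter (fun p => p.2 == w)) := by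
      apply List.flatMap_congr
      intro w hw
      rw [List.filter_filter]
      apply List.filter_congr
      intro p _
      by_cases h : p.2 = w
      · have hwv : ¬ w = v := fun hv => hvn (hv ▸ hw)
        simp [h, hwv]
      · simp [h]
    rw [hrest]
    refine ((List.Perm.append_left _ (ih _ hnd' ?_)).trans
      (List.filter_append_perm (fun p => p.2 == v) E))
    intro p hp
    rcases List.mem_filter.1 hp with ⟨hpE, hpv⟩
    rcases List.mem_cons.1 (hcov p hpE) with h | h
    · exact absurd h (by simpa using hpv)
    · exact h

lemma grp_perm (array : List String) :
    (grpL array).Perm ((PySem.List.enumerate array 0).map (fun p => (p.2, p.1))) := by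
  have h1 : grpL array
      = ((uniqL array).flatMap (fun v => (PySem.List.enumerate array 0).filter
          (fun p => p.2 == v))).map (fun p => (p.2, p.1)) := by
    rw [grpL, List.map_flatMap]
    apply List.flatMap_congr
    intro v _
    rw [occL, List.map_map]
    apply List.map_congr_left
    intro p hp
    have : p.2 = v := by simpa using (List.mem_filter.1 hp).2
    simp [this]
  rw [h1]
  apply List.Perm.map
  apply flatMap_filter_perm _ _ (uniq_nodup array)
  intro p hp
  rcases (PySem.List.mem_enumerate_iff _ _ _).1 hp with ⟨k, hk, rfl⟩
  exact (mem_uniq_iff array _).2 (List.getElem_mem hk)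

lemma occ_pairwise (array : List String) (v : String) :
    (occL array v).Pairwise (· < ·) := by
  rw [occL]
  exact List.pairwise_map.2 ((PySem.List.pairwise_lt_enumerate array 0).filter _)

lemma grp_pairwise (array : List String) :
    (grpL array).Pairwise (fun a b => (toLex a : Lex (String × Int)) < toLex b) := by
  rw [grpL]
  refine List.pairwise_flatMap.2 ⟨?_, ?_⟩
  · intro v _
    exact List.pairwise_map.2 ((occ_pairwise array v).imp (fun h => lex_right v h))
  · refine (uniq_pairwise array).imp ?_
    intro v w hvw x hx y hy
    rcases List.mem_map.1 hx with ⟨i, _, rfl⟩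
    rcases List.mem_map.1 hy with ⟨j, _, rfl⟩
    exact lex_left i j hvw

lemma sorted2_eq_sorted_lex (xs : List (String × Int)) :
    PySem.List.sorted2 xs (fun q => q.1) (fun q => q.2)
    = PySem.List.sorted xs (fun q => (toLex q : Lex (String × Int))) := by
  show List.foldl _ [] xs = List.foldl _ [] xs
  congr 1
  funext acc x
  congr 1
  funext a b
  show (decide (a.1 < b.1) || (!decide (b.1 < a.1) && decide (a.2 < b.2))) = decide _
  rcases lt_trichotomy a.1 b.1 with h | h | h
  · simp [Prod.Lex.lt_iff, h]
  · simp [Prod.Lex.lt_iff, h]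
  · simp [Prod.Lex.lt_iff, h, not_lt.2 h.le, h.ne']

lemma pairs_eq_grp (array : List String) :
    PySem.List.sorted2 ((PySem.List.enumerate array 0).map (fun p => (p.2, p.1)))
      (fun q => q.1) (fun q => q.2) = grpL array := by
  rw [sorted2_eq_sorted_lex]
  exact PySem.List.sorted_eq_of_perm_of_pairwise_lt _ _ _ (grp_perm array) (grp_pairwise array)

-- ---- B's side: the sweep, by groups ----

lemma inner_fold (v : String) (is : List Int) (d : PySem.Dict String Int)
    (a : List Int) (r : Int) :
    (is.map (fun i => (v, i))).foldl (fun s q =>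
      match s with
      | (d, a, r, prev) =>
        if prev = none ∨ ¬ prev = some q.1 then
          (d.insert q.1 (r + 1), (a.set q.2.toNat (r + 1), (r + 1, some q.1)))
        else
          (d, (a.set q.2.toNat r, (r, prev))))
      (d, (a, (r, some v)))
    = (d, (is.foldl (fun a i => a.set i.toNat r) a, (r, some v))) := by
  induction is generalizing a with
  | nil => rfl
  | cons i is ih =>
    rw [List.map_cons, List.foldl_cons, List.foldl_cons]
    have hc : ¬ ((some v : Option String) = none ∨ ¬ (some v : Option String) = some v) := by simp
    show (is.map (fun i => (v, i))).foldl _ (if (some v : Option String) = none ∨ ¬ (some v : Option String) = some v then _ else _) = _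
    rw [if_neg hc]
    exact ih _

lemma big_fold (array : List String) : ∀ (vs : List String) (d : PySem.Dict String Int)
    (a : List Int) (r : Int) (prev : Option String),
    vs.Pairwise (· < ·) → (∀ v ∈ vs, occL array v ≠ []) → (∀ v ∈ vs, prev ≠ some v) →
    (vs.flatMap (fun v => (occL array v).map (fun i => (v, i)))).foldl (fun s q =>
      match s with
      | (d, a, r, prev) =>
        if prev = none ∨ ¬ prev = some q.1 then
          (d.insert q.1 (r + 1), (a.set q.2.toNat (r + 1), (r + 1, some q.1)))
        else
          (d, (a.set q.2.toNat r, (r, prev))))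
      (d, (a, (r, prev)))
    = ((PySem.List.enumerate vs (r + 1)).foldl (fun d p => d.insert p.2 p.1) d,
       ((PySem.List.enumerate vs (r + 1)).foldl
          (fun a p => (occL array p.2).foldl (fun a i => a.set i.toNat p.1) a) a,
        (r + vs.length, vs.foldl (fun _ w => some w) prev))) := by
  intro vs
  induction vs with
  | nil => intro d a r prev _ _ _; simp [PySem.List.enumerate]
  | cons v vs ih =>
    intro d a r prev hpw hocc hprev
    rcases List.pairwise_cons.1 hpw with ⟨hvlt, hpw'⟩
    rcases List.exists_cons_of_ne_nil (hocc v (List.mem_cons_self ..)) with ⟨i, is, hvis⟩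
    rw [List.flatMap_cons, List.foldl_append, hvis, List.map_cons, List.foldl_cons]
    have hc : (prev = none ∨ ¬ prev = some v) := Or.inr (hprev v (List.mem_cons_self ..))
    show List.foldl _ (List.foldl _ (if prev = none ∨ ¬ prev = some v then _ else _) (is.map (fun i => (v, i)))) (vs.flatMap _) = _
    rw [if_pos hc]
    show List.foldl _ (List.foldl _ (d.insert v (r + 1), (a.set i.toNat (r + 1), (r + 1, some v))) (is.map (fun i => (v, i)))) (vs.flatMap _) = _
    rw [inner_fold,
      ih (d.insert v (r + 1)) _ (r + 1) (some v) hpw'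
        (fun w hw => hocc w (List.mem_cons_of_mem _ hw))
        (fun w hw => by simpa using (hvlt w hw).ne)]
    rw [PySem.List.enumerate_cons, List.foldl_cons, List.foldl_cons, hvis, List.foldl_cons]
    simp only [List.foldl_cons, Prod.mk.injEq, List.length_cons, true_and, and_true]
    push_cast
    ring

-- ---- B's side: scattering the ranks back ----

lemma scatter_untouched (f : String × Int → Int) (qs : List (String × Int)) (a : List Int)
    (j : Nat) (hj : ∀ q ∈ qs, q.2 ≠ (j : Int)) (hnn : ∀ q ∈ qs, 0 ≤ q.2) :
    (qs.foldl (fun a q => a.set q.2.toNat (f q)) a)[j]? = a[j]? := by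
  induction qs generalizing a with
  | nil => rfl
  | cons q qs ih =>
    rw [List.foldl_cons, ih _ (fun q hq => hj q (List.mem_cons_of_mem _ hq))
      (fun q hq => hnn q (List.mem_cons_of_mem _ hq))]
    apply List.getElem?_set_ne
    have h1 := hj q (List.mem_cons_self ..)
    have h2 := hnn q (List.mem_cons_self ..)
    omega

lemma scatter_length (f : String × Int → Int) (qs : List (String × Int)) (a : List Int) :
    (qs.foldl (fun a q => a.set q.2.toNat (f q)) a).length = a.length := by
  induction qs generalizing a with
  | nil => rfl
  | cons q qs ih => rw [List.foldl_cons, ih, List.length_set]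

lemma scatter_hit (f : String × Int → Int) (qs : List (String × Int)) (a : List Int)
    (v : String) (j : Nat) (hnd : (qs.map (fun q => q.2)).Nodup)
    (hmem : (v, (j : Int)) ∈ qs) (hnn : ∀ q ∈ qs, 0 ≤ q.2) (hlen : j < a.length) :
    (qs.foldl (fun a q => a.set q.2.toNat (f q)) a)[j]? = some (f (v, (j : Int))) := by
  induction qs generalizing a with
  | nil => simp at hmem
  | cons q qs ih =>
    rw [List.map_cons, List.nodup_cons] at hnd
    rcases List.mem_cons.1 hmem with rfl | hmem'
    · rw [List.foldl_cons]
      rw [scatter_untouched _ _ _ _ ?_ (fun q hq => hnn q (List.mem_cons_of_mem _ hq))]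
      · simpa using List.getElem?_set_self (by simpa using hlen)
      · intro q' hq' h
        exact hnd.1 (h ▸ List.mem_map.2 ⟨q', hq', rfl⟩)
    · have hq2 : q.2 ≠ (j : Int) := by
        intro h
        exact hnd.1 (h ▸ List.mem_map.2 ⟨(v, (j : Int)), hmem', rfl⟩)
      rw [List.foldl_cons]
      exact ih _ hnd.2 hmem' (fun q hq => hnn q (List.mem_cons_of_mem _ hq))
        (by rwa [List.length_set])

lemma grp_snd_nonneg (array : List String) : ∀ q ∈ grpL array, 0 ≤ q.2 := by
  intro q hq
  rcases List.mem_map.1 ((grp_perm array).mem_iff.1 hq) with ⟨p, hp, rfl⟩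
  rcases (PySem.List.mem_enumerate_iff _ _ _).1 hp with ⟨k, hk, rfl⟩
  simp

lemma grp_snd_nodup (array : List String) : ((grpL array).map (fun q => q.2)).Nodup := by
  have h2 := (grp_perm array).map (fun q => q.2)
  rw [List.map_map] at h2
  refine h2.nodup_iff.2 ?_
  have h3 : ((PySem.List.enumerate array 0).map (fun p => p.1)).Pairwise (· < ·) :=
    List.pairwise_map.2 (PySem.List.pairwise_lt_enumerate array 0)
  exact h3.imp (fun h => ne_of_lt h)

lemma mem_grp (array : List String) (j : Nat) (hj : j < array.length) :
    (array[j], (j : Int)) ∈ grpL array := by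
  refine (grp_perm array).mem_iff.2 (List.mem_map.2 ⟨((j : Int), array[j]), ?_, rfl⟩)
  exact (PySem.List.mem_enumerate_iff _ _ _).2 ⟨j, hj, by simp⟩

lemma B_array (array : List String) :
    (grpL array).foldl (fun a q => a.set q.2.toNat (rnk array q.1))
      (List.replicate array.length 0)
    = array.map (rnk array) := by
  apply List.ext_getElem?
  intro j
  by_cases hj : j < array.length
  · rw [scatter_hit (fun q => rnk array q.1) _ _ (array[j]) j (grp_snd_nodup array)
      (mem_grp array j hj) (grp_snd_nonneg array) (by rwa [List.length_replicate])]
    rw [List.getElem?_map, List.getElem?_eq_getElem hj]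
    rfl
  · rw [List.getElem?_eq_none (by rw [scatter_length, List.length_replicate]; omega),
      List.getElem?_eq_none (by rw [List.length_map]; omega)]

lemma occ_ne_nil (array : List String) (v : String) (hv : v ∈ uniqL array) :
    occL array v ≠ [] := by
  rcases List.getElem_of_mem ((mem_uniq_iff array v).1 hv) with ⟨k, hk, rfl⟩
  intro h
  have hmem : ((k : Int)) ∈ occL array (array[k]) := by
    rw [occL]
    exact List.mem_map.2 ⟨((k : Int), array[k]),
      List.mem_filter.2 ⟨(PySem.List.mem_enumerate_iff _ _ _).2 ⟨k, hk, by simp⟩, by simp⟩, rfl⟩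
  rw [h] at hmem
  simp at hmem

lemma rank_of_mem_enum (array : List String) (p : Int × String)
    (hp : p ∈ PySem.List.enumerate (uniqL array) (0 + 1)) : p.1 = rnk array p.2 := by
  rcases (PySem.List.mem_enumerate_iff _ _ _).1 hp with ⟨k, hk, rfl⟩
  have := (uniq_nodup array).idxOf_getElem k hk
  simp [rnk, this]
  omega

lemma B_eval (array : List String) :
    parseSymbolArray_alt array
    = ((PySem.List.enumerate (uniqL array) 0).map (fun p => (p.2, p.1 + 1)),
        array.map (rnk array)) := by
  show (_, _) = _
  rw [pairs_eq_grp, grpL,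
    big_fold array (uniqL array) PySem.Dict.empty (List.replicate array.length 0) 0 none
      (uniq_pairwise array) (fun v hv => occ_ne_nil array v hv) (fun v _ => by simp)]
  refine Prod.ext ?_ ?_
  · show (List.foldl (fun d p => d.insert p.2 p.1) PySem.Dict.empty
        (PySem.List.enumerate (uniqL array) (0 + 1))).items = _
    rw [PySem.Dict.items_foldl_insert_fresh (PySem.List.enumerate (uniqL array) (0 + 1))
      (fun p => p.2) (fun p => p.1) PySem.Dict.empty
      (fun a _ => PySem.Dict.contains_empty _)
      (by rw [PySem.List.map_snd_enumerate]; exact uniq_nodup array)]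
    rw [enumerate_shift, List.map_map]
    simp [PySem.Dict.empty]
  · show List.foldl (fun a p => (occL array p.2).foldl (fun a i => a.set i.toNat p.1) a)
        (List.replicate array.length 0) (PySem.List.enumerate (uniqL array) (0 + 1)) = _
    rw [PySem.List.foldl_congr_mem (PySem.List.enumerate (uniqL array) (0 + 1))
      (fun a p => (occL array p.2).foldl (fun a i => a.set i.toNat p.1) a)
      (fun a p => (occL array p.2).foldl (fun a i => a.set i.toNat (rnk array p.2)) a)
      (List.replicate array.length 0)
      (fun acc p hp => by
        show (occL array p.2).foldl (fun a i => a.set i.toNat p.1) acc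
          = (occL array p.2).foldl (fun a i => a.set i.toNat (rnk array p.2)) acc
        rw [rank_of_mem_enum array p hp])]
    have hstep : (PySem.List.enumerate (uniqL array) (0 + 1)).foldl
        (fun a p => (occL array p.2).foldl (fun a i => a.set i.toNat (rnk array p.2)) a)
        (List.replicate array.length 0)
        = (uniqL array).foldl
        (fun a v => (occL array v).foldl (fun a i => a.set i.toNat (rnk array v)) a)
        (List.replicate array.length 0) := by
      conv_rhs => rw [← PySem.List.map_snd_enumerate (uniqL array) (0 + 1)]
      rw [List.foldl_map]
    rw [hstep, ← B_array array, grpL, List.foldl_flatMap]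
    simp only [List.foldl_map]

-- ===== VERDICT (by name: the statement is the Claim_ definition above) =====
theorem parseSymbolArray_spec : Claim_equal_parseSymbolArray := by
  intro array _
  show parseSymbolArray array = parseSymbolArray_alt array
  rw [A_eval, B_eval]
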